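-- pv_equiv track=rewrite | github.com/AntonLysachev/sina_site | sina_site/shift_schedule/controllers.py | validation_shifts
-- ===== SOURCE A (Python) =====
-- def validation_shifts(shifts):
--     valid_shifts = []
--     for shift in shifts:
--         meta = shift[2:]
--         if meta in valid_shifts:
--             return False
--         valid_shifts.append(meta)
--     return True
-- ===== SOURCE B (Python) =====
-- def validation_shifts(shifts):
--     metas = [shift[2:] for shift in shifts]
--     return len(metas) == len(set(metas))
-- ===== Notes on version B (the rewrite author's own statement) =====
-- stated objective: simpler
-- what changed: Replaces the incremental seen-list with O(n) membership scans and early return by materializing all suffixes once and comparing the total count to the count of distinct ones.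
import Mathlib
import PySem

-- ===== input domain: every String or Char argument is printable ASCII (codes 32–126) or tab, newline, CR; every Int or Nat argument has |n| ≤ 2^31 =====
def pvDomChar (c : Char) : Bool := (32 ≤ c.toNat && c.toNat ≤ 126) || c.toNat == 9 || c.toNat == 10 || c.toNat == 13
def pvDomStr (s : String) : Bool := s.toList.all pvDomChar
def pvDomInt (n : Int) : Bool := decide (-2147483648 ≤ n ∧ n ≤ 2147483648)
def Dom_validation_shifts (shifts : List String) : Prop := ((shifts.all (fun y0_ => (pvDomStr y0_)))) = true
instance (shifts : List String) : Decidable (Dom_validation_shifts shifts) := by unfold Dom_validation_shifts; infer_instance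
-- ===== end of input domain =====

-- B replaces A's incremental seen-list with early return by building all suffixes once
-- and comparing total count to distinct count (simpler, no explicit membership loop).


-- ===== PORT A =====
-- shift[2:] on a string
def vsMeta (s : String) : String := PySem.Str.slice s (some 2) none

-- the for-loop of A: seen-list accumulator, early return False on a repeat
def vsGo (valid_shifts : List String) (l : List String) : Bool :=
  match l with
  | [] => true
  | shift :: rest =>
    let m := vsMeta shift
    if valid_shifts.contains m then false
    else vsGo (valid_shifts ++ [m]) rest

def validation_shifts (shifts : List String) : Bool := vsGo [] shifts

-- ===== PORT B =====
def validation_shifts_alt (shifts : List String) : Bool :=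
  let metas := shifts.map (fun shift => vsMeta shift)
  metas.length == (PySem.Set.ofList metas).length

-- ===== PRECONDITION & SPEC =====
def Spec_validation_shifts (shifts : List String) (out : Bool) : Prop := out = validation_shifts_alt shifts
instance (shifts : List String) (out : Bool) : Decidable (Spec_validation_shifts shifts out) := by unfold Spec_validation_shifts; infer_instance

-- ===== CLAIM (what is proved, stated in full; the proofs are below) =====
def Claim_equal_validation_shifts : Prop := ∀ (shifts : List String), Dom_validation_shifts shifts → Spec_validation_shifts shifts (validation_shifts shifts)

-- ===== LEMMAS AND PROOFS =====

-- A's loop returns true iff the seen-list extended by all remaining suffixes is duplicate-free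
theorem vsGo_eq_nodup (l : List String) : ∀ (acc : List String), acc.Nodup →
    (vsGo acc l = true ↔ (acc ++ l.map vsMeta).Nodup) := by
  induction l with
  | nil => intro acc h; simp [vsGo, h]
  | cons s r ih =>
    intro acc h
    by_cases hm : vsMeta s ∈ acc
    · have hgo : vsGo acc (s :: r) = false := by
        simp [vsGo, hm]
      rw [hgo]
      simp only [Bool.false_eq_true, false_iff]
      intro hnd
      exact (List.nodup_append.mp hnd).2.2 (vsMeta s) hm (vsMeta s) (by simp) rfl
    · have h' : (acc ++ [vsMeta s]).Nodup := by
        rw [List.nodup_append]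
        exact ⟨h, List.nodup_singleton _, by intro a ha b hb heq; simp at hb; subst hb; exact hm (heq ▸ ha)⟩
      have hgo : vsGo acc (s :: r) = vsGo (acc ++ [vsMeta s]) r := by
        simp [vsGo, hm]
      rw [hgo, ih (acc ++ [vsMeta s]) h', List.append_assoc]
      simp

-- distinct-count equals total count iff the list is duplicate-free
theorem beq_len_ofList (xs : List String) :
    ((xs.length == (PySem.Set.ofList xs).length) = true) ↔ xs.Nodup := by
  rw [beq_iff_eq]
  have hiff : xs.toFinset.card = xs.length ↔ xs.Nodup :=
    Multiset.toFinset_card_eq_card_iff_nodup (m := (xs : Multiset String))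
  constructor
  · intro hlen
    have hfin : (PySem.Set.ofList xs).toFinset = xs.toFinset := by
      ext a; simp [PySem.Set.mem_ofList]
    have h1 : (PySem.Set.ofList xs).toFinset.card = (PySem.Set.ofList xs).length :=
      List.toFinset_card_of_nodup (PySem.Set.nodup_ofList xs)
    exact hiff.mp (by rw [← hfin, h1, hlen])
  · intro h
    rw [PySem.Set.ofList_eq_self_of_nodup xs h]

-- ===== VERDICT (by name: the statement is the Claim_ definition above) =====
theorem validation_shifts_spec : Claim_equal_validation_shifts := by
  intro shifts _
  unfold Spec_validation_shifts validation_shifts validation_shifts_alt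
  have ha := vsGo_eq_nodup shifts [] List.nodup_nil
  simp only [List.nil_append] at ha
  have hb := beq_len_ofList (shifts.map (fun s => vsMeta s))
  simp only [] at hb ⊢
  rw [show (List.map (fun s => vsMeta s) shifts) = List.map vsMeta shifts from rfl] at hb
  cases hA : vsGo [] shifts with
  | true => exact ((hb.mpr (ha.mp hA))).symm
  | false =>
    cases hB : ((List.map vsMeta shifts).length == (PySem.Set.ofList (List.map vsMeta shifts)).length) with
    | false => rfl
    | true => exact absurd (ha.mpr (hb.mp hB)) (by simp [hA])
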